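-- pv_equiv track=rewrite | github.com/chocolatemelt/focus | snippets/python-invitations/invitations.py | map_invitees
-- ===== SOURCE A (Python) =====
-- def map_invitees(res):
--     """Maps invitees from a valid response body to their respective countries.
--
--     Args:
--         res - A response body as a dictionary.
--
--     Returns:
--         Dictionary mapping countries to its invitees.
--     """
--     country_mapping = {}
--     for partner in res['partners']:
--         partner_country = partner['country']
--         if partner_country in country_mapping:
--             country_mapping[partner_country].append(partner)
--         else:
--             country_mapping[partner_country] = [partner]
--
--     return country_mapping
-- ===== SOURCE B (Python) =====
-- def map_invitees(res):
--     """Maps invitees from a valid response body to their respective countries.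
--
--     Re-implementation: first collect the distinct countries in order of first
--     appearance, then build each country's group with one filtering pass,
--     instead of accumulating lists in a dict during a single scan.
--     """
--     partners = res['partners']
--     countries = list(dict.fromkeys(p['country'] for p in partners))
--     return {c: [p for p in partners if p['country'] == c] for c in countries}
-- ===== Notes on version B (the rewrite author's own statement) =====
-- stated objective: alternative
-- what changed: Replaces the single-pass dict accumulation (membership test then append-or-create) with a two-phase plan: an ordered dedup of the countries followed by one filter comprehension per country; same dict, keys in first-occurrence order.
import Mathlib
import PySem

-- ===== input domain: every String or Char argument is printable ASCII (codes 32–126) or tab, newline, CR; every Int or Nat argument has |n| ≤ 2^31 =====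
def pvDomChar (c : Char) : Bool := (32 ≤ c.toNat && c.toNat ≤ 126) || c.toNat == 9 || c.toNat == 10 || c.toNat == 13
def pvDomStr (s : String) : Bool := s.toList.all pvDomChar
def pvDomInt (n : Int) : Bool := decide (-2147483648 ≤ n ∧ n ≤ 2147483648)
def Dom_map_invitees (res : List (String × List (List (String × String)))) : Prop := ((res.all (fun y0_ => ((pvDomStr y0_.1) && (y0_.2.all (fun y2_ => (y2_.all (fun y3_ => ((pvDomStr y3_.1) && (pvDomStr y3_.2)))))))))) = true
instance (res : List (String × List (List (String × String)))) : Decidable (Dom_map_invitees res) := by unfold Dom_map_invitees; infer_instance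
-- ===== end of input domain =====

-- B replaces A's one-pass dict accumulation by an ordered dedup of the countries
-- followed by one filtering pass per country (alternative decomposition, same result).


-- partner['country']; exact under Pre_, which guarantees the key is present
def pvCountry (p : List (String × String)) : String :=
  (PySem.Dict.mk p).getD "country" ""

-- ===== PORT A =====
def map_invitees (res : List (String × List (List (String × String)))) : List (String × List (List (String × String))) :=
  ((((PySem.Dict.mk res).getD "partners" []).foldl
    (fun d p =>
      let c := pvCountry p
      if d.contains c then d.modify c [] (fun l => l ++ [p]) else d.insert c [p])
    PySem.Dict.empty)).items

-- ===== PORT B =====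
def map_invitees_alt (res : List (String × List (List (String × String)))) : List (String × List (List (String × String))) :=
  let partners := (PySem.Dict.mk res).getD "partners" []
  (PySem.Set.ofList (partners.map pvCountry)).map
    (fun c => (c, partners.filter (fun p => pvCountry p == c)))

-- ===== PRECONDITION & SPEC =====
-- Pre_ excludes exactly the inputs where Python A raises KeyError: a res without
-- a 'partners' key, or a partner without a 'country' key.
def Pre_map_invitees (res : List (String × List (List (String × String)))) : Prop :=
  ((PySem.Dict.mk res).get? "partners").isSome = true ∧
  ∀ p ∈ (PySem.Dict.mk res).getD "partners" [], ((PySem.Dict.mk p).get? "country").isSome = true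

instance (res : List (String × List (List (String × String)))) : Decidable (Pre_map_invitees res) := by unfold Pre_map_invitees; infer_instance

def pvWitness_map_invitees : (List (String × List (List (String × String)))) :=
  [("partners", [[("country", "US"), ("name", "a")], [("country", "DE")], [("country", "US")]])]

def Spec_map_invitees (res : List (String × List (List (String × String)))) (out : List (String × List (List (String × String)))) : Prop := out = map_invitees_alt res
instance (res : List (String × List (List (String × String)))) (out : List (String × List (List (String × String)))) : Decidable (Spec_map_invitees res out) := by unfold Spec_map_invitees; infer_instance

-- ===== CLAIM (what is proved, stated in full; the proofs are below) =====
def Claim_equal_map_invitees : Prop := ∀ (res : List (String × List (List (String × String)))), Dom_map_invitees res → Pre_map_invitees res → Spec_map_invitees res (map_invitees res)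

-- ===== LEMMAS AND PROOFS =====

-- A's loop body is exactly a 'modify with default []' step
lemma step_eq_modify (d : PySem.Dict String (List (List (String × String)))) (p : List (String × String)) :
    (let c := pvCountry p
     if d.contains c then d.modify c [] (fun l => l ++ [p]) else d.insert c [p])
    = d.modify (pvCountry p) [] (fun l => l ++ [p]) := by
  by_cases h : d.contains (pvCountry p) = true
  · simp [h]
  · simp only [Bool.not_eq_true] at h
    rw [PySem.Dict.modify, PySem.Dict.getD_of_not_contains (h := h)]
    simp [h]

-- the grouping loop, characterised: keys = ordered dedup of countries, value = filter
lemma loop_items (ps : List (List (String × String))) :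
    (ps.foldl (fun d p =>
        let c := pvCountry p
        if d.contains c then d.modify c [] (fun l => l ++ [p]) else d.insert c [p])
      PySem.Dict.empty).items
    = (PySem.Set.ofList (ps.map pvCountry)).map
        (fun c => (c, ps.filter (fun p => pvCountry p == c))) := by
  have hcong : (ps.foldl (fun d p =>
        let c := pvCountry p
        if d.contains c then d.modify c [] (fun l => l ++ [p]) else d.insert c [p])
      PySem.Dict.empty)
      = ps.foldl (fun d p => d.modify (pvCountry p) [] (fun l => l ++ [p])) PySem.Dict.empty := by
    congr 1
    funext d p
    exact step_eq_modify d p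
  rw [hcong]
  have hnd : (ps.foldl (fun d p => d.modify (pvCountry p) [] (fun l => l ++ [p])) PySem.Dict.empty).keys.Nodup :=
    PySem.Dict.nodup_keys_foldl_modify_key ps pvCountry [] (fun _ p l => l ++ [p]) PySem.Dict.empty
      (by simp)
  rw [PySem.Dict.items_eq_map_keys _ hnd []]
  rw [PySem.Dict.keys_foldl_modify_key ps pvCountry [] (fun _ p l => l ++ [p]) PySem.Dict.empty]
  have hkeys : PySem.Set.update (PySem.Dict.empty : PySem.Dict String (List (List (String × String)))).keys (ps.map pvCountry)
      = PySem.Set.ofList (ps.map pvCountry) := rfl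
  rw [hkeys]
  apply List.map_congr_left
  intro c _
  have hpair : ps.foldl (fun d p => d.modify (pvCountry p) [] (fun l => l ++ [p])) PySem.Dict.empty
      = (ps.map (fun p => (pvCountry p, p))).foldl (fun d q => d.modify q.1 [] (fun l => l ++ [q.2])) PySem.Dict.empty := by
    rw [List.foldl_map]
  rw [hpair, PySem.Dict.getD_foldl_modify_append]
  simp [List.filter_map, Function.comp_def]

theorem map_invitees_eq (res : List (String × List (List (String × String)))) :
    map_invitees res = map_invitees_alt res := by
  unfold map_invitees map_invitees_alt
  exact loop_items _

-- ===== VERDICT (by name: the statement is the Claim_ definition above) =====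
theorem map_invitees_spec : Claim_equal_map_invitees := by
  intro res _ _
  unfold Spec_map_invitees
  exact map_invitees_eq res
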